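-- pv_equiv track=rewrite | github.com/mekoid/kriptografi | dencoder/dencoder_rot.py | rot_to_text
-- ===== SOURCE A (Python) =====
-- def rot_to_text(encoded_str, rot_num):
--     decoded_text = ""
--     for char in encoded_str:
--         if char.isalpha():
--             char_code = ord(char)
--             if char.islower():
--                 base_code = ord('a')
--             else:
--                 base_code = ord('A')
--             decoded_code = ((char_code - base_code - rot_num) % 26) + base_code
--             decoded_char = chr(decoded_code)
--             decoded_text += decoded_char
--         else:
--             decoded_text += char
--     return decoded_text
-- ===== SOURCE B (Python) =====
-- def _shift_one(c):
--     o = ord(c)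
--     if o == 122 or o == 90:          # 'z' -> 'a', 'Z' -> 'A'
--         return chr(o - 25)
--     if 97 <= o <= 121 or 65 <= o <= 89:
--         return chr(o + 1)
--     return c
--
--
-- def rot_to_text(encoded_str, rot_num):
--     # decoding by rot_num = encoding by (-rot_num) % 26; apply a +1 Caesar
--     # step that many whole-string passes (at most 25).
--     s = encoded_str
--     for _ in range((-rot_num) % 26):
--         s = "".join(_shift_one(c) for c in s)
--     return s
-- ===== Notes on version B (the rewrite author's own statement) =====
-- stated objective: alternative
-- what changed: B decodes by reducing rot_num to r=(-rot_num)%26 and then applying a fixed +1 Caesar step (a wrap-at-z successor map) to the whole string r times, instead of A's single pass doing per-character modular arithmetic.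
import Mathlib
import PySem

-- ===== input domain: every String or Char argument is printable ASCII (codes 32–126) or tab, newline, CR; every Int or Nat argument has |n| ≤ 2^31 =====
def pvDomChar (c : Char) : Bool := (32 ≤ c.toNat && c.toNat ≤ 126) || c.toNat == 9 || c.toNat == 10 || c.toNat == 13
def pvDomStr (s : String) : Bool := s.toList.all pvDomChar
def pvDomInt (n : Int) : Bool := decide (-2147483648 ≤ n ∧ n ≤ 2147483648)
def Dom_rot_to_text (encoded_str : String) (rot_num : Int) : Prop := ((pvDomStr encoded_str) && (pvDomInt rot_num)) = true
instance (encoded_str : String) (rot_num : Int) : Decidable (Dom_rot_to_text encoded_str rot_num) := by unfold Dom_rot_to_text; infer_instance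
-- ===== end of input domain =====

-- B replaces A's single pass of per-character modular arithmetic by r = (-rot_num) % 26
-- whole-string applications of a fixed +1 Caesar successor step (alternative algorithm, not faster).


-- ===== PORT A =====
def rot_to_text (encoded_str : String) (rot_num : Int) : String :=
  encoded_str.toList.foldl (fun decoded_text char =>
    if PySem.Chars.isalpha char then
      let char_code : Int := char.toNat
      let base_code : Int := if PySem.Chars.islower char then ('a'.toNat : Int) else ('A'.toNat : Int)
      let decoded_code := PySem.Int.mod (char_code - base_code - rot_num) 26 + base_code
      -- chr(decoded_code): exact here since 65 ≤ decoded_code ≤ 122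
      let decoded_char := Char.ofNat decoded_code.toNat
      decoded_text ++ String.ofList [decoded_char]
    else
      decoded_text ++ String.ofList [char]) ""

-- ===== PORT B =====
-- _shift_one from Source B
def shiftOneChar (c : Char) : Char :=
  let o := c.toNat
  if o = 122 ∨ o = 90 then Char.ofNat (o - 25)        -- chr: exact, 97 or 65
  else if (97 ≤ o ∧ o ≤ 121) ∨ (65 ≤ o ∧ o ≤ 89) then Char.ofNat (o + 1)  -- chr: exact, ≤ 122
  else c

def rot_to_text_alt (encoded_str : String) (rot_num : Int) : String :=
  (List.range (PySem.Int.mod (-rot_num) 26).toNat).foldl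
    (fun s _ => String.ofList (s.toList.map shiftOneChar)) encoded_str

-- ===== PRECONDITION & SPEC =====
def Spec_rot_to_text (encoded_str : String) (rot_num : Int) (out : String) : Prop := out = rot_to_text_alt encoded_str rot_num
instance (encoded_str : String) (rot_num : Int) (out : String) : Decidable (Spec_rot_to_text encoded_str rot_num out) := by unfold Spec_rot_to_text; infer_instance

-- ===== CLAIM (what is proved, stated in full; the proofs are below) =====
def Claim_equal_rot_to_text : Prop := ∀ (encoded_str : String) (rot_num : Int), Dom_rot_to_text encoded_str rot_num → Spec_rot_to_text encoded_str rot_num (rot_to_text encoded_str rot_num)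

-- ===== LEMMAS AND PROOFS =====

-- A's per-character transformation, factored out for the proof
def gA (rot_num : Int) (char : Char) : Char :=
  if PySem.Chars.isalpha char then
    Char.ofNat (PySem.Int.mod ((char.toNat : Int) - (if PySem.Chars.islower char then ('a'.toNat : Int) else ('A'.toNat : Int)) - rot_num) 26 + (if PySem.Chars.islower char then ('a'.toNat : Int) else ('A'.toNat : Int))).toNat
  else char

lemma islower_iff (c : Char) : PySem.Chars.islower c = true ↔ (97 ≤ c.toNat ∧ c.toNat ≤ 122) := by
  have ha : ('a').val.toNat = 97 := rfl
  have hz : ('z').val.toNat = 122 := rfl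
  simp only [PySem.Chars.islower, Bool.and_eq_true, decide_eq_true_eq, Char.le_def,
    UInt32.le_iff_toNat_le, Char.toNat, ha, hz]

lemma isupper_iff (c : Char) : PySem.Chars.isupper c = true ↔ (65 ≤ c.toNat ∧ c.toNat ≤ 90) := by
  have ha : ('A').val.toNat = 65 := rfl
  have hz : ('Z').val.toNat = 90 := rfl
  simp only [PySem.Chars.isupper, Bool.and_eq_true, decide_eq_true_eq, Char.le_def,
    UInt32.le_iff_toNat_le, Char.toNat, ha, hz]

lemma toNat_ofNat_small (v : Nat) (h : v < 128) : (Char.ofNat v).toNat = v := by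
  have hv : Nat.isValidChar v := Or.inl (by omega)
  rw [Char.ofNat, dif_pos hv]
  exact UInt32.toNat_ofNatLT

lemma foldl_append_singleton_str (g : Char → Char) :
    ∀ (l : List Char) (acc : String),
      l.foldl (fun a c => a ++ String.ofList [g c]) acc = acc ++ String.ofList (l.map g) := by
  intro l
  induction l with
  | nil => intro acc; apply String.ext; simp
  | cons c t ih =>
      intro acc
      simp only [List.foldl_cons, ih, List.map_cons]
      apply String.ext; simp

lemma rot_to_text_eq_map (s : String) (r : Int) :
    rot_to_text s r = String.ofList (s.toList.map (gA r)) := by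
  have h : rot_to_text s r = s.toList.foldl (fun a c => a ++ String.ofList [gA r c]) "" := by
    unfold rot_to_text gA
    congr 1
    funext a c
    by_cases h1 : PySem.Chars.isalpha c <;> simp [h1]
  rw [h, foldl_append_singleton_str]
  apply String.ext; simp

lemma rot_to_text_alt_eq_iterate (s : String) (r : Int) :
    rot_to_text_alt s r
      = String.ofList (s.toList.map (shiftOneChar^[(PySem.Int.mod (-r) 26).toNat])) := by
  unfold rot_to_text_alt
  generalize (PySem.Int.mod (-r) 26).toNat = n
  induction n with
  | zero => apply String.ext; simp
  | succ k ih =>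
      rw [List.range_succ, List.foldl_append, ih]
      simp only [List.foldl_cons, List.foldl_nil]
      rw [Function.iterate_succ']
      apply String.ext
      simp [List.map_map, Function.comp_def]

-- iterating the successor step on a lowercase letter code
lemma iter_low (k v : Nat) (h1 : 97 ≤ v) (h2 : v ≤ 122) :
    shiftOneChar^[k] (Char.ofNat v) = Char.ofNat (97 + (v - 97 + k) % 26) := by
  induction k with
  | zero =>
      simp only [Function.iterate_zero, id]
      congr 1; omega
  | succ m ih =>
      rw [Function.iterate_succ_apply', ih]
      have hm : (v - 97 + m) % 26 < 26 := Nat.mod_lt _ (by omega)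
      simp only [shiftOneChar, toNat_ofNat_small _ (by omega : 97 + (v - 97 + m) % 26 < 128)]
      by_cases hz : (v - 97 + m) % 26 = 25
      · rw [if_pos (by omega)]
        congr 1
        have h26 : (v - 97 + (m + 1)) % 26 = 0 := by omega
        omega
      · rw [if_neg (by omega), if_pos (by omega)]
        congr 1
        have h26 : (v - 97 + (m + 1)) % 26 = (v - 97 + m) % 26 + 1 := by omega
        omega

-- iterating the successor step on an uppercase letter code
lemma iter_up (k v : Nat) (h1 : 65 ≤ v) (h2 : v ≤ 90) :
    shiftOneChar^[k] (Char.ofNat v) = Char.ofNat (65 + (v - 65 + k) % 26) := by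
  induction k with
  | zero =>
      simp only [Function.iterate_zero, id]
      congr 1; omega
  | succ m ih =>
      rw [Function.iterate_succ_apply', ih]
      have hm : (v - 65 + m) % 26 < 26 := Nat.mod_lt _ (by omega)
      simp only [shiftOneChar, toNat_ofNat_small _ (by omega : 65 + (v - 65 + m) % 26 < 128)]
      by_cases hz : (v - 65 + m) % 26 = 25
      · rw [if_pos (by omega)]
        congr 1
        have h26 : (v - 65 + (m + 1)) % 26 = 0 := by omega
        omega
      · rw [if_neg (by omega), if_pos (by omega)]
        congr 1
        have h26 : (v - 65 + (m + 1)) % 26 = (v - 65 + m) % 26 + 1 := by omega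
        omega

lemma iter_other (k : Nat) (c : Char) (h1 : ¬ (97 ≤ c.toNat ∧ c.toNat ≤ 122))
    (h2 : ¬ (65 ≤ c.toNat ∧ c.toNat ≤ 90)) : shiftOneChar^[k] c = c := by
  induction k with
  | zero => rfl
  | succ m ih =>
      rw [Function.iterate_succ_apply', ih]
      unfold shiftOneChar
      rw [if_neg (by omega), if_neg (by omega)]

lemma arith97 (x : Nat) (r : Int) (h1 : 97 ≤ x) (h2 : x ≤ 122) :
    (((x : Int) - 97 - r) % 26 + 97).toNat = 97 + ((x - 97 + ((-r) % 26).toNat) % 26) := by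
  set k : Nat := ((-r) % 26).toNat with hkdef
  have hk : ((-r) % 26 : Int) = (k : Int) := by omega
  have e1 : ((x : Int) - 97 - r) % 26 = ((x - 97 + k : Nat) : Int) % 26 := by
    push_cast
    omega
  have e2 : (((x - 97 + k : Nat) : Int)) % 26 = (((x - 97 + k) % 26 : Nat) : Int) := by
    push_cast
    omega
  rw [e1, e2]
  omega

lemma arith65 (x : Nat) (r : Int) (h1 : 65 ≤ x) (h2 : x ≤ 90) :
    (((x : Int) - 65 - r) % 26 + 65).toNat = 65 + ((x - 65 + ((-r) % 26).toNat) % 26) := by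
  set k : Nat := ((-r) % 26).toNat with hkdef
  have hk : ((-r) % 26 : Int) = (k : Int) := by omega
  have e1 : ((x : Int) - 65 - r) % 26 = ((x - 65 + k : Nat) : Int) % 26 := by
    push_cast
    omega
  have e2 : (((x - 65 + k : Nat) : Int)) % 26 = (((x - 65 + k) % 26 : Nat) : Int) := by
    push_cast
    omega
  rw [e1, e2]
  omega

lemma gA_eq_iter (r : Int) (c : Char) :
    gA r c = shiftOneChar^[(PySem.Int.mod (-r) 26).toNat] c := by
  have hmod : PySem.Int.mod (-r) 26 = (-r) % 26 :=
    PySem.Int.mod_eq_emod_of_pos (by norm_num)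
  unfold gA
  by_cases hl : 97 ≤ c.toNat ∧ c.toNat ≤ 122
  · have hlow : PySem.Chars.islower c = true := (islower_iff c).2 hl
    have halpha : PySem.Chars.isalpha c = true := by simp [PySem.Chars.isalpha, hlow]
    rw [if_pos halpha, if_pos hlow]
    conv_rhs => rw [← Char.ofNat_toNat c]
    rw [iter_low _ _ hl.1 hl.2, hmod,
      PySem.Int.mod_eq_emod_of_pos (b := 26) (by norm_num)]
    congr 1
    have ha : (('a'.toNat : Nat) : Int) = 97 := rfl
    rw [ha]
    exact arith97 c.toNat r hl.1 hl.2
  · by_cases hu : 65 ≤ c.toNat ∧ c.toNat ≤ 90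
    · have hup : PySem.Chars.isupper c = true := (isupper_iff c).2 hu
      have hlow : PySem.Chars.islower c = false := by
        rw [Bool.eq_false_iff, ne_eq, islower_iff]; omega
      have halpha : PySem.Chars.isalpha c = true := by simp [PySem.Chars.isalpha, hup]
      rw [if_pos halpha, if_neg (by simp [hlow])]
      conv_rhs => rw [← Char.ofNat_toNat c]
      rw [iter_up _ _ hu.1 hu.2, hmod,
        PySem.Int.mod_eq_emod_of_pos (b := 26) (by norm_num)]
      congr 1
      have ha : (('A'.toNat : Nat) : Int) = 65 := rfl
      rw [ha]
      exact arith65 c.toNat r hu.1 hu.2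
    · have halpha : PySem.Chars.isalpha c = false := by
        rw [Bool.eq_false_iff, ne_eq, PySem.Chars.isalpha, Bool.or_eq_true, not_or,
          ← Bool.ne_false_iff]
        constructor
        · simp only [Bool.eq_false_iff, ne_eq, isupper_iff] at *; omega
        · simp only [islower_iff] at *; omega
      rw [if_neg (by simp [halpha]), iter_other _ _ hl hu]

-- ===== VERDICT (by name: the statement is the Claim_ definition above) =====
theorem rot_to_text_spec : Claim_equal_rot_to_text := by
  intro s r _
  unfold Spec_rot_to_text
  rw [rot_to_text_eq_map, rot_to_text_alt_eq_iterate]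
  congr 1
  exact List.map_congr_left (fun c _ => gA_eq_iter r c)
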